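-- pv_equiv track=rewrite | github.com/jano31415/codejam | codejam/y2022/round1a/proba.py | solve
-- ===== SOURCE A (Python) =====
-- def solve(s):
--     l=[]
--     for i in range(len(s)):
--         l.append(s[i])
--         if i != len(s)-1:
--             if ord(s[i]) == ord(s[i+1]):
--                 for j in range(i+1, len(s)):
--                     if ord(s[i]) < ord(s[j]):
--                         l.append(s[i])
--                         break
--                     if ord(s[i]) > ord(s[j]):
--                         break
--             elif ord(s[i]) < ord(s[i+1]):
--                 l.append(s[i])
--
--     return "".join(l)
-- ===== SOURCE B (Python) =====
-- def solve(s):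
--     # Single right-to-left pass: flag = first differing char to the right compares greater.
--     out = []
--     flag = False
--     prev = None
--     for c in reversed(s):
--         if prev is None:
--             flag = False
--         elif c != prev:
--             flag = c < prev
--         out.append(c)
--         if flag:
--             out.append(c)
--         prev = c
--     out.reverse()
--     return "".join(out)
-- ===== Notes on version B (the rewrite author's own statement) =====
-- stated objective: faster
-- what changed: Replaced the per-position forward rescan by one right-to-left pass carrying a flag that records whether the first differing character to the right compares greater.
import Mathlib
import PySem

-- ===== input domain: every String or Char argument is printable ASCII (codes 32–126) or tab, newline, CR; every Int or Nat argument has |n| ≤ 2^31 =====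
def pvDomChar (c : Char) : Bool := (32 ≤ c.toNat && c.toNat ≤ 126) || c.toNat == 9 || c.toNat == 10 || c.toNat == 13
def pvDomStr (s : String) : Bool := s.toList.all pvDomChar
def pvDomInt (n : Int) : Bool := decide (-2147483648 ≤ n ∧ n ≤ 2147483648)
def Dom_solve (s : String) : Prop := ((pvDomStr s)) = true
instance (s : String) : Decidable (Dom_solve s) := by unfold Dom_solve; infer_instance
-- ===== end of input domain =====

-- B replaces A's quadratic forward rescans by one right-to-left pass carrying a flag recording whether the first differing character to the right compares greater.

-- ===== PORT A =====
-- inner loop 'for j in range(i+1, len(s))': returns true iff it appends (ord c < ord s[j] before any ord c > ord s[j])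
def solveInner (c : Char) (js : List Char) : Bool :=
  match js with
  | [] => false
  | j :: rest =>
    if c.toNat < j.toNat then true
    else if c.toNat > j.toNat then false
    else solveInner c rest

-- outer loop over i; at position i, rest is s[i+1:], so s[i+1] is rest.head
def solveGo (cs : List Char) : List Char :=
  match cs with
  | [] => []
  | c :: rest =>
    match rest with
    | [] => c :: solveGo rest
    | d :: _ =>
      if c.toNat = d.toNat then
        (if solveInner c rest then c :: c :: solveGo rest else c :: solveGo rest)
      else if c.toNat < d.toNat then c :: c :: solveGo rest
      else c :: solveGo rest

def solve (s : String) : String := String.ofList (solveGo s.toList)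

-- ===== PORT B =====
-- right-to-left single pass; .2 is the flag: first differing character after the head compares greater
def altGo (cs : List Char) : List Char × Bool :=
  match cs with
  | [] => ([], false)
  | c :: rest =>
    let p := altGo rest
    let flag : Bool :=
      match rest with
      | [] => false
      | d :: _ => if c ≠ d then decide (c < d) else p.2
    ((if flag then c :: c :: p.1 else c :: p.1), flag)

def solve_alt (s : String) : String := String.ofList (altGo s.toList).1

-- ===== PRECONDITION & SPEC =====
def Spec_solve (s : String) (out : String) : Prop := out = solve_alt s
instance (s : String) (out : String) : Decidable (Spec_solve s out) := by unfold Spec_solve; infer_instance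

-- ===== CLAIM (what is proved, stated in full; the proofs are below) =====
def Claim_equal_solve : Prop := ∀ (s : String), Dom_solve s → Spec_solve s (solve s)

-- ===== LEMMAS AND PROOFS =====

theorem char_lt_decide (c d : Char) : decide (c < d) = decide (c.toNat < d.toNat) := by
  simp [Char.lt_def, UInt32.lt_iff_toNat_lt, Char.toNat_val]

theorem char_eq_iff_toNat (c d : Char) : c = d ↔ c.toNat = d.toNat := by
  constructor
  · intro h; rw [h]
  · intro h
    exact Char.ext (by simpa [← Char.toNat_val, UInt32.toNat_inj] using h)

theorem altGo_snd_cons (c d : Char) (rest : List Char) :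
    (altGo (c :: d :: rest)).2 = if c = d then (altGo (d :: rest)).2 else decide (c < d) := by
  by_cases h : c = d <;> simp [altGo, h]

theorem altGo_fst_cons (c : Char) (cs : List Char) :
    (altGo (c :: cs)).1 =
      if (altGo (c :: cs)).2 then c :: c :: (altGo cs).1 else c :: (altGo cs).1 := by
  cases cs <;> rfl

theorem altGo_flag (cs : List Char) (c : Char) :
    (altGo (c :: cs)).2 = solveInner c cs := by
  induction cs generalizing c with
  | nil => rfl
  | cons d rest ih =>
    rw [altGo_snd_cons, ih d]
    show _ = solveInner c (d :: rest)
    by_cases h : c = d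
    · have hn : ¬ c.toNat < d.toNat ∧ ¬ c.toNat > d.toNat := by
        rw [char_eq_iff_toNat] at h; omega
      subst h
      simp [solveInner]
    · have hn : c.toNat ≠ d.toNat := by
        intro hv; exact h ((char_eq_iff_toNat c d).2 hv)
      by_cases hlt : c.toNat < d.toNat
      · simp [solveInner, h, hlt, char_lt_decide]
      · have hgt : c.toNat > d.toNat := by omega
        simp [solveInner, h, hlt, hgt, char_lt_decide]

theorem solveGo_eq (cs : List Char) : solveGo cs = (altGo cs).1 := by
  induction cs with
  | nil => rfl
  | cons c rest ih =>
    rw [altGo_fst_cons, altGo_flag, ← ih]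
    cases rest with
    | nil => rfl
    | cons d r =>
      show (if c.toNat = d.toNat then _ else _) = _
      by_cases h : c = d
      · have he : c.toNat = d.toNat := (char_eq_iff_toNat c d).1 h
        subst h
        have hn : ¬ c.toNat < c.toNat := lt_irrefl _
        simp [solveInner]
      · have hn : c.toNat ≠ d.toNat := fun hv => h ((char_eq_iff_toNat c d).2 hv)
        by_cases hlt : c.toNat < d.toNat
        · simp [solveInner, hn, hlt, char_lt_decide]  
        · have hgt : c.toNat > d.toNat := by omega
          simp [solveInner, hn, hlt, hgt]

-- ===== VERDICT (by name: the statement is the Claim_ definition above) =====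
theorem solve_spec : Claim_equal_solve := by
  intro s _
  unfold Spec_solve solve solve_alt
  rw [solveGo_eq]
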